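-- pv_equiv track=rewrite | github.com/kwalker314/advent-of-code | 2021/day12.py | neighbors2
-- ===== SOURCE A (Python) =====
-- def neighbors2(caves, current_cave) -> {str}:
--     neighbors = set()
--     for cave in caves:
--         cave0 = cave[0]
--         cave1 = cave[1]
--         if cave0 == current_cave and cave1 != 'start':
--             neighbors.add(cave1)
--         elif cave1 == current_cave and cave0 != 'start':
--             neighbors.add(cave0)
--     return neighbors
-- ===== SOURCE B (Python) =====
-- def neighbors2(caves, current_cave) -> {str}:
--     graph = {}
--     for a, b in caves:
--         if b != 'start':
--             graph.setdefault(a, set()).add(b)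
--         if a != 'start':
--             graph.setdefault(b, set()).add(a)
--     return graph.get(current_cave, set())
-- ===== Notes on version B (the rewrite author's own statement) =====
-- stated objective: alternative
-- what changed: B builds a full adjacency dict (cave -> set of neighbors, excluding 'start' per direction) in one pass over all edges and answers the query by a single dict lookup, instead of A's targeted filtering scan that tests each edge against current_cave.
import Mathlib
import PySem

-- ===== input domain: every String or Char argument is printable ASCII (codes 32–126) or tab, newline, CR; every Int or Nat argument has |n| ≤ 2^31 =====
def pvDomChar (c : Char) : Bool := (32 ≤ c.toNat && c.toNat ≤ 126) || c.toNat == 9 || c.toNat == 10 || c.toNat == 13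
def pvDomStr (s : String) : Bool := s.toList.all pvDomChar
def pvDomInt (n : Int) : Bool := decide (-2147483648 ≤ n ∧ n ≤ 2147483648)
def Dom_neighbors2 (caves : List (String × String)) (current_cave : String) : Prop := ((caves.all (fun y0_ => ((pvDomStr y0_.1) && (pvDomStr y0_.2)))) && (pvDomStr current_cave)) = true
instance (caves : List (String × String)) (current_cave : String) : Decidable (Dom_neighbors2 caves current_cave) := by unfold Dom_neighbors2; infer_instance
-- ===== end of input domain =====

-- B replaces A's per-edge filter on current_cave by a full adjacency table built once and queried by lookup (objective: alternative).

-- ===== PORT A =====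
def neighbors2 (caves : List (String × String)) (current_cave : String) : List String :=
  caves.foldl (fun neighbors cave =>
    let cave0 := cave.1
    let cave1 := cave.2
    if cave0 = current_cave ∧ cave1 ≠ "start" then PySem.Set.add neighbors cave1
    else if cave1 = current_cave ∧ cave0 ≠ "start" then PySem.Set.add neighbors cave0
    else neighbors) PySem.Set.empty

-- ===== PORT B =====
def neighbors2_alt (caves : List (String × String)) (current_cave : String) : List String :=
  let graph : PySem.Dict String (PySem.Set String) :=
    caves.foldl (fun g e =>
      let g := if e.2 ≠ "start" then g.modify e.1 PySem.Set.empty (fun s => PySem.Set.add s e.2) else g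
      if e.1 ≠ "start" then g.modify e.2 PySem.Set.empty (fun s => PySem.Set.add s e.1) else g)
      PySem.Dict.empty
  graph.getD current_cave PySem.Set.empty

-- ===== PRECONDITION & SPEC =====
def Spec_neighbors2 (caves : List (String × String)) (current_cave : String) (out : List String) : Prop := out = neighbors2_alt caves current_cave
instance (caves : List (String × String)) (current_cave : String) (out : List String) : Decidable (Spec_neighbors2 caves current_cave out) := by unfold Spec_neighbors2; infer_instance

-- ===== CLAIM (what is proved, stated in full; the proofs are below) =====
def Claim_equal_neighbors2 : Prop := ∀ (caves : List (String × String)) (current_cave : String), Dom_neighbors2 caves current_cave → Spec_neighbors2 caves current_cave (neighbors2 caves current_cave)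

-- ===== LEMMAS AND PROOFS =====

-- loop invariant: the entry of current_cave in B's dict evolves exactly as A's accumulator
theorem inv_lemma (cc : String) (l : List (String × String))
    (g : PySem.Dict String (PySem.Set String)) :
    (l.foldl (fun g e =>
      let g := if e.2 ≠ "start" then g.modify e.1 PySem.Set.empty (fun s => PySem.Set.add s e.2) else g
      if e.1 ≠ "start" then g.modify e.2 PySem.Set.empty (fun s => PySem.Set.add s e.1) else g) g).getD cc PySem.Set.empty
    = l.foldl (fun neighbors cave =>
        if cave.1 = cc ∧ cave.2 ≠ "start" then PySem.Set.add neighbors cave.2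
        else if cave.2 = cc ∧ cave.1 ≠ "start" then PySem.Set.add neighbors cave.1
        else neighbors) (g.getD cc PySem.Set.empty) := by
  induction l generalizing g with
  | nil => rfl
  | cons e t ih =>
    obtain ⟨a, b⟩ := e
    simp only [List.foldl_cons]
    rw [ih]
    congr 1
    by_cases hb : b = "start" <;> by_cases ha : a = "start" <;>
      by_cases hca : a = cc <;> by_cases hcb : b = cc <;>
      simp [hb, ha, hca, hcb, PySem.Dict.getD_modify] <;>
      split_ifs <;> subst_vars <;> simp_all [PySem.Dict.getD_modify_of_ne, Ne.symm]

-- ===== VERDICT (by name: the statement is the Claim_ definition above) =====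
theorem neighbors2_spec : Claim_equal_neighbors2 := by
  intro caves cc _
  unfold Spec_neighbors2 neighbors2 neighbors2_alt
  rw [inv_lemma]
  rfl
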